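-- pv_equiv track=rewrite | github.com/RichardMiruka/alx-interview | player_simulation/player_simulation.py | solution
-- ===== SOURCE A (Python) =====
-- def solution(S):
--     n= len(S)
--     positions = [0] * n # Initialize the positions of the players as all at position 0
--
--     for i in range(n):
--         move = S[i] # Get the current movement command for the player
--         current_pos = positions[i] # Get the current position of the player
--
--         # Update the position of the player based on the movement command
--         if move == '^':
--             current_pos -= 1 # Move the player up one step
--         elif move == 'v':
--             current_pos += 1 # Move the player down one step
--         elif move == '<':
--             current_pos -= 1 # Move the player left one step
--         elif move == '>':
--             current_pos += 1 # Move the player right one step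
--
--         # Check if the new position is valid (not occupied by another player)
--         if current_pos in positions[:i] + positions[i+1:]:
--             continue  # Move is not successful
--
--         positions[i] = current_pos
--
--     # Count the number of players with successful moves
--     successful_moves = sum(1 for pos in positions if pos != 0)
--
--     return successful_moves
-- ===== SOURCE B (Python) =====
-- def solution(S):
--     # Each player starts at 0 and only the first player heading to a given side
--     # claims that slot; later same-direction moves are blocked. So the answer is
--     # just how many distinct direction slots appear in S.
--     return int(any(c in '^<' for c in S)) + int(any(c in 'v>' for c in S))
-- ===== Notes on version B (the rewrite author's own statement) =====
-- stated objective: faster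
-- what changed: Replaces the simulation with a positions array and a per-step O(n) membership scan by a closed form: count whether any up/left direction char appears plus whether any down/right direction char appears.
import Mathlib
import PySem

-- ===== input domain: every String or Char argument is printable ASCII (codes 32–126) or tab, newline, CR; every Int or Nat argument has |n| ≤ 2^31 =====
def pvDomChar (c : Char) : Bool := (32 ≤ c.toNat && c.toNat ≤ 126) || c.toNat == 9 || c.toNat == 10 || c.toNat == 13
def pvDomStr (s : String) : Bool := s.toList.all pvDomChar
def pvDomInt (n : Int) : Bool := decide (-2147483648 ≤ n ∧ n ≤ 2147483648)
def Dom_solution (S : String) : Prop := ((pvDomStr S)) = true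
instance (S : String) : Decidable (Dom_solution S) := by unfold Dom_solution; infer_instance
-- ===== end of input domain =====

-- B replaces A's quadratic occupancy simulation by a closed-form count of which of the
-- two direction slots (the '^'/'<' slot or the 'v'/'>' slot) occurs in S; proved equal on all inputs.


-- ===== PORT A =====
-- the body of A's for-loop (one step of the simulation), as a helper
def stepA (cs : List Char) (positions : List Int) (i : Nat) : List Int :=
  let move := cs[i]?.getD ' '                 -- S[i]; i is always in range here
  let current_pos0 := positions[i]?.getD 0    -- positions[i]; i is always in range here
  let current_pos :=
    if move = '^' then current_pos0 - 1
    else if move = 'v' then current_pos0 + 1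
    else if move = '<' then current_pos0 - 1
    else if move = '>' then current_pos0 + 1
    else current_pos0
  if (positions.take i ++ positions.drop (i+1)).contains current_pos then
    positions                                 -- move not successful: continue
  else
    positions.set i current_pos

-- literal transliteration of A: n zeros, the for-loop over range(n), count of nonzeros
def solution (S : String) : Int :=
  let cs := S.toList
  let n := cs.length
  let positions : List Int := List.replicate n 0
  let positions := (List.range n).foldl (stepA cs) positions
  ((positions.countP (fun pos => pos != 0) : Nat) : Int)

-- ===== PORT B =====
def solution_alt (S : String) : Int :=
  (if S.toList.any (fun c => c == '^' || c == '<') then 1 else 0) +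
  (if S.toList.any (fun c => c == 'v' || c == '>') then 1 else 0)

-- ===== PRECONDITION & SPEC =====
def Spec_solution (S : String) (out : Int) : Prop := out = solution_alt S
instance (S : String) (out : Int) : Decidable (Spec_solution S out) := by unfold Spec_solution; infer_instance

-- ===== CLAIM (what is proved, stated in full; the proofs are below) =====
def Claim_equal_solution : Prop := ∀ (S : String), Dom_solution S → Spec_solution S (solution S)

-- ===== LEMMAS AND PROOFS =====

def isNegC (c : Char) : Bool := c == '^' || c == '<'
def isPosC (c : Char) : Bool := c == 'v' || c == '>'

-- closed-form description of A's positions array after processing a prefix, given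
-- whether each of the two direction slots was already claimed
def build : List Char → Bool → Bool → List Int
  | [], _, _ => []
  | c :: rest, sn, sp =>
    if isNegC c && !sn then (-1) :: build rest true sp
    else if isPosC c && !sp then 1 :: build rest sn true
    else 0 :: build rest sn sp

theorem build_nil (sn sp : Bool) : build [] sn sp = [] := rfl
theorem build_cons (c : Char) (rest : List Char) (sn sp : Bool) :
    build (c :: rest) sn sp =
      (if isNegC c && !sn then (-1) :: build rest true sp
       else if isPosC c && !sp then 1 :: build rest sn true
       else 0 :: build rest sn sp) := rfl

theorem isPosC_of_neg (c : Char) (h : isNegC c = true) : isPosC c = false := by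
  simp only [isNegC, Bool.or_eq_true, beq_iff_eq] at h
  rcases h with h | h <;> subst h <;> decide

theorem isNegC_of_pos (c : Char) (h : isPosC c = true) : isNegC c = false := by
  simp only [isPosC, Bool.or_eq_true, beq_iff_eq] at h
  rcases h with h | h <;> subst h <;> decide

theorem length_build (p : List Char) (sn sp : Bool) : (build p sn sp).length = p.length := by
  induction p generalizing sn sp with
  | nil => rfl
  | cons c rest ih => rw [build_cons]; split_ifs <;> simp [ih]

theorem build_append (p : List Char) (c : Char) (sn sp : Bool) :
    build (p ++ [c]) sn sp =
      build p sn sp ++ build [c] (sn || p.any isNegC) (sp || p.any isPosC) := by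
  induction p generalizing sn sp with
  | nil => simp [build_nil]
  | cons d rest ih =>
    rw [List.cons_append, build_cons, build_cons d rest]
    by_cases hn : isNegC d = true
    · have hp : isPosC d = false := isPosC_of_neg d hn
      cases sn <;> simp [List.any_cons, hn, hp, ih]
    · rw [Bool.not_eq_true] at hn
      by_cases hp : isPosC d = true
      · cases sp <;> simp [List.any_cons, hn, hp, ih]
      · rw [Bool.not_eq_true] at hp
        simp [List.any_cons, hn, hp, ih]

theorem mem_build_neg (p : List Char) (sn sp : Bool) :
    ((-1 : Int) ∈ build p sn sp) ↔ (!sn && p.any isNegC) = true := by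
  induction p generalizing sn sp with
  | nil => simp [build_nil]
  | cons c rest ih =>
    rw [build_cons]
    split_ifs with h1 h2
    · rw [Bool.and_eq_true, Bool.not_eq_true'] at h1
      simp [List.any_cons, h1.1, h1.2]
    · cases hsn : sn
      · have hc : isNegC c = false := by
          cases hh : isNegC c
          · rfl
          · exact absurd (by rw [Bool.and_eq_true, Bool.not_eq_true']; exact ⟨hh, hsn⟩) h1
        simp [List.mem_cons, List.any_cons, hc, ih, hsn]
      · simp [List.mem_cons, List.any_cons, ih, hsn]
    · cases hsn : sn
      · have hc : isNegC c = false := by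
          cases hh : isNegC c
          · rfl
          · exact absurd (by rw [Bool.and_eq_true, Bool.not_eq_true']; exact ⟨hh, hsn⟩) h1
        simp [List.mem_cons, List.any_cons, hc, ih, hsn]
      · simp [List.mem_cons, List.any_cons, ih, hsn]

theorem mem_build_pos (p : List Char) (sn sp : Bool) :
    ((1 : Int) ∈ build p sn sp) ↔ (!sp && p.any isPosC) = true := by
  induction p generalizing sn sp with
  | nil => simp [build_nil]
  | cons c rest ih =>
    rw [build_cons]
    split_ifs with h1 h2
    · rw [Bool.and_eq_true, Bool.not_eq_true'] at h1
      have hp : isPosC c = false := isPosC_of_neg c h1.1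
      cases hsp : sp <;> simp [List.mem_cons, List.any_cons, hp, ih, hsp]
    · rw [Bool.and_eq_true, Bool.not_eq_true'] at h2
      simp [List.any_cons, h2.1, h2.2]
    · cases hsp : sp
      · have hc : isPosC c = false := by
          cases hh : isPosC c
          · rfl
          · exact absurd (by rw [Bool.and_eq_true, Bool.not_eq_true']; exact ⟨hh, hsp⟩) h2
        simp [List.mem_cons, List.any_cons, hc, ih, hsp]
      · simp [List.mem_cons, List.any_cons, ih, hsp]

theorem count_build (p : List Char) (sn sp : Bool) :
    (build p sn sp).countP (fun pos => pos != 0) =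
      (if (!sn && p.any isNegC) = true then 1 else 0) +
      (if (!sp && p.any isPosC) = true then 1 else 0) := by
  induction p generalizing sn sp with
  | nil => simp [build_nil]
  | cons c rest ih =>
    rw [build_cons]
    by_cases hn : isNegC c = true
    · have hp : isPosC c = false := isPosC_of_neg c hn
      cases hsn : sn <;>
        simp [List.countP_cons, List.any_cons, hn, hp, hsn, ih] <;>
        first | omega | (split_ifs <;> omega)
    · rw [Bool.not_eq_true] at hn
      by_cases hp : isPosC c = true
      · cases hsp : sp <;>
          simp [List.countP_cons, List.any_cons, hn, hp, hsp, ih] <;>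
          first | omega | (split_ifs <;> omega)
      · rw [Bool.not_eq_true] at hp
        simp [List.countP_cons, List.any_cons, hn, hp, ih] <;>
        first | omega | (split_ifs <;> omega)

theorem set_mid (l r : List Int) (a b : Int) :
    (l ++ a :: r).set l.length b = l ++ b :: r := by
  induction l with
  | nil => rfl
  | cons x xs ih => simp [List.set, ih]

theorem set_mid' (l r : List Int) (a b : Int) (k : Nat) (h : l.length = k) :
    (l ++ a :: r).set k b = l ++ b :: r := by
  subst h; exact set_mid l r a b

-- one simulation step turns the k-prefix description into the (k+1)-prefix description
theorem step_build (cs : List Char) (k : Nat) (hk : k < cs.length) :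
    stepA cs (build (cs.take k) false false ++ List.replicate (cs.length - k) 0) k =
      build (cs.take (k+1)) false false ++ List.replicate (cs.length - (k+1)) 0 := by
  set bp := build (cs.take k) false false with hbp
  have hlen : bp.length = k := by
    rw [hbp, length_build, List.length_take]; omega
  have hrep : cs.length - k = (cs.length - (k+1)) + 1 := by omega
  rw [hrep, List.replicate_succ]
  simp only [stepA]
  have hmove : cs[k]?.getD ' ' = cs[k] := by
    rw [List.getElem?_eq_getElem hk]; rfl
  have hcur : (bp ++ (0 : Int) :: List.replicate (cs.length - (k+1)) 0)[k]?.getD 0 = 0 := by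
    rw [List.getElem?_append_right (by omega), hlen]
    simp
  have htake : (bp ++ (0 : Int) :: List.replicate (cs.length - (k+1)) 0).take k = bp := by
    rw [← hlen]; exact List.take_left ..
  have hdrop : (bp ++ (0 : Int) :: List.replicate (cs.length - (k+1)) 0).drop (k+1)
      = List.replicate (cs.length - (k+1)) 0 := by
    have h0 : bp ++ (0 : Int) :: List.replicate (cs.length - (k+1)) 0
        = (bp ++ [0]) ++ List.replicate (cs.length - (k+1)) 0 := by simp
    have hl : (bp ++ [(0 : Int)]).length = k + 1 := by simp [hlen]
    rw [h0, ← hl]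
    exact List.drop_left ..
  rw [hmove, hcur, htake, hdrop]
  have htk : cs.take (k+1) = cs.take k ++ [cs[k]] := by
    rw [List.take_succ, List.getElem?_eq_getElem hk]; rfl
  rw [htk, build_append, ← hbp]
  simp only [Bool.false_or]
  set sn := (cs.take k).any isNegC with hsn
  set sp := (cs.take k).any isPosC with hsp
  by_cases hneg : isNegC cs[k] = true
  · -- the move heads for the '^'/'<' slot
    have hc : cs[k] = '^' ∨ cs[k] = '<' := by
      simpa [isNegC] using hneg
    have hval : (if cs[k] = '^' then (0:Int) - 1
        else if cs[k] = 'v' then 0 + 1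
        else if cs[k] = '<' then 0 - 1
        else if cs[k] = '>' then 0 + 1 else 0) = -1 := by
      rcases hc with h | h <;> rw [h] <;> decide
    rw [hval]
    have hcontains : (bp ++ List.replicate (cs.length - (k+1)) (0:Int)).contains (-1) = sn := by
      simp only [List.contains_eq_mem, List.mem_append, List.mem_replicate, hbp,
        mem_build_neg, ← hsn]
      cases sn <;> simp
    rw [hcontains]
    cases hsnv : sn
    · rw [if_neg Bool.false_ne_true]
      rw [set_mid' _ _ _ _ _ hlen]
      have hb1 : build [cs[k]] false sp = [-1] := by
        rw [build_cons, if_pos (by simp [hneg]), build_nil]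
      rw [hb1]
      simp
    · rw [if_pos rfl]
      have hb1 : build [cs[k]] true sp = [0] := by
        rw [build_cons, if_neg (by simp [hneg]),
          if_neg (by simp [isPosC_of_neg _ hneg]), build_nil]
      rw [hb1]
      simp
  · by_cases hpos : isPosC cs[k] = true
    · -- the move heads for the 'v'/'>' slot
      have hc : cs[k] = 'v' ∨ cs[k] = '>' := by
        simpa [isPosC] using hpos
      have hval : (if cs[k] = '^' then (0:Int) - 1
          else if cs[k] = 'v' then 0 + 1
          else if cs[k] = '<' then 0 - 1
          else if cs[k] = '>' then 0 + 1 else 0) = 1 := by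
        rcases hc with h | h <;> rw [h] <;> decide
      rw [hval]
      have hcontains : (bp ++ List.replicate (cs.length - (k+1)) (0:Int)).contains 1 = sp := by
        simp only [List.contains_eq_mem, List.mem_append, List.mem_replicate, hbp,
          mem_build_pos, ← hsp]
        cases sp <;> simp
      rw [hcontains]
      cases hspv : sp
      · rw [if_neg Bool.false_ne_true]
        rw [set_mid' _ _ _ _ _ hlen]
        have hb1 : build [cs[k]] sn false = [1] := by
          rw [build_cons, if_neg (by simp [isNegC_of_pos _ hpos]),
            if_pos (by simp [hpos]), build_nil]
        rw [hb1]
        simp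
      · rw [if_pos rfl]
        have hb1 : build [cs[k]] sn true = [0] := by
          rw [build_cons, if_neg (by simp [isNegC_of_pos _ hpos]),
            if_neg (by simp [hpos]), build_nil]
        rw [hb1]
        simp
    · -- current_pos = 0: the positions array is unchanged either way
      rw [Bool.not_eq_true] at hneg hpos
      have hne : ¬ (cs[k] = '^') ∧ ¬ (cs[k] = 'v') ∧ ¬ (cs[k] = '<') ∧ ¬ (cs[k] = '>') := by
        refine ⟨?_, ?_, ?_, ?_⟩ <;> intro h <;>
          simp [isNegC, isPosC, h] at hneg hpos
      have hval : (if cs[k] = '^' then (0:Int) - 1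
          else if cs[k] = 'v' then 0 + 1
          else if cs[k] = '<' then 0 - 1
          else if cs[k] = '>' then 0 + 1 else 0) = 0 := by
        rw [if_neg hne.1, if_neg hne.2.1, if_neg hne.2.2.1, if_neg hne.2.2.2]
      rw [hval]
      have hb1 : build [cs[k]] sn sp = [0] := by
        rw [build_cons, if_neg (by simp [hneg]), if_neg (by simp [hpos]), build_nil]
      rw [hb1]
      split_ifs with h
      · simp
      · rw [set_mid' _ _ _ _ _ hlen]
        simp

-- the loop invariant: after processing indices < k the positions array is
-- build (cs.take k) false false padded with zeros
theorem loop_invariant (cs : List Char) (k : Nat) (hk : k ≤ cs.length) :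
    (List.range k).foldl (stepA cs) (List.replicate cs.length 0) =
      build (cs.take k) false false ++ List.replicate (cs.length - k) 0 := by
  induction k with
  | zero => simp [build_nil]
  | succ k ih =>
    have hk' : k ≤ cs.length := Nat.le_of_succ_le hk
    rw [List.range_succ, List.foldl_append, ih hk']
    simp only [List.foldl_cons, List.foldl_nil]
    exact step_build cs k hk

theorem any_eq_neg (cs : List Char) :
    cs.any (fun c => c == '^' || c == '<') = cs.any isNegC := rfl
theorem any_eq_pos (cs : List Char) :
    cs.any (fun c => c == 'v' || c == '>') = cs.any isPosC := rfl

-- ===== VERDICT (by name: the statement is the Claim_ definition above) =====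
theorem solution_spec : Claim_equal_solution := by
  intro S _
  unfold Spec_solution
  simp only [solution, solution_alt]
  rw [loop_invariant S.toList S.toList.length (le_refl _)]
  rw [Nat.sub_self, List.replicate_zero, List.append_nil, List.take_length]
  rw [count_build, any_eq_neg, any_eq_pos]
  simp only [Bool.not_false, Bool.true_and]
  split_ifs <;> simp
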